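-- pv_equiv track=rewrite | github.com/nlhepler/countrymap | lib/countrymap/_countrymap.py | data2isodict
-- ===== SOURCE A (Python) =====
-- _dead_countries = {
--     'CS': ['ME', 'RS'],
--     'YU': ['BA', 'HR', 'ME', 'MK', 'RS', 'SI']
-- }
--
-- def data2isodict(data):
--     new2dead = {}
--     for dead, news in _dead_countries.items():
--         for new in news:
--             if new not in new2dead:
--                 new2dead[new] = []
--             new2dead[new].append(dead)
--     isodict = {}
--     for row in data:
--         if 'ISO_A2' not in row:
--             raise ValueError('no ISO_A2 field found, shapedata cannot be organized by ISO code!')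
--         isocode = row['ISO_A2']
--         isodict[isocode] = [row]
--         if isocode in new2dead:
--             deadcodes = new2dead[isocode]
--             for deadcode in deadcodes:
--                 if deadcode not in isodict:
--                     isodict[deadcode] = []
--                 isodict[deadcode].append(row)
--     return isodict
-- ===== SOURCE B (Python) =====
-- _dead_countries = {
--     'CS': ['ME', 'RS'],
--     'YU': ['BA', 'HR', 'ME', 'MK', 'RS', 'SI']
-- }
--
-- def data2isodict(data):
--     isodict = {}
--     for row in data:
--         if 'ISO_A2' not in row:
--             raise ValueError('no ISO_A2 field found, shapedata cannot be organized by ISO code!')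
--         isocode = row['ISO_A2']
--         keys = [isocode] + [dead for dead, news in _dead_countries.items() if isocode in news]
--         for key in keys:
--             if key == isocode:
--                 isodict[key] = [row]
--             else:
--                 isodict[key] = isodict.get(key, []) + [row]
--     return isodict
-- ===== Notes on version B (the rewrite author's own statement) =====
-- stated objective: alternative
-- what changed: Removes A's precomputed new2dead inverted index and its dict-membership/append machinery: B computes, per row, one uniform target-key list (the isocode plus the dead codes whose successor list contains it, by a direct comprehension over _dead_countries) and updates the dict with a single generic insert using get-with-default.
import Mathlib
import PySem

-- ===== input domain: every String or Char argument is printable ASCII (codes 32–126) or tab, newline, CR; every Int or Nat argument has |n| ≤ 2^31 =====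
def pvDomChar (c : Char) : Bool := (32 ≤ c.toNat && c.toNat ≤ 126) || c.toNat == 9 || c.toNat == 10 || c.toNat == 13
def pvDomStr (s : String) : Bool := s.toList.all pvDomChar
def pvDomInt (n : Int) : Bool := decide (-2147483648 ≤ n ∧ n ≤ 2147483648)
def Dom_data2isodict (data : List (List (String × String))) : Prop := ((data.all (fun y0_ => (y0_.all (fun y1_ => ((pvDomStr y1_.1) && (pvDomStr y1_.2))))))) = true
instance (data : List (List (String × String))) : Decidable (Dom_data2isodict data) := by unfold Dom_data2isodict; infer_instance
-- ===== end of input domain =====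

-- B drops A's precomputed new2dead inverted index: per row it builds one uniform
-- target-key list straight from _dead_countries and applies a single generic
-- get-with-default insert for every key (same return value; objective: alternative).


-- ===== PORT A =====
-- the module constant _dead_countries (dict literal, insertion order)
def deadCountries : List (String × List String) :=
  [("CS", ["ME", "RS"]), ("YU", ["BA", "HR", "ME", "MK", "RS", "SI"])]

-- A's per-row loop body (named so the proof can compare the two loop bodies)
def stepA (new2dead : PySem.Dict String (List String))
    (iso : PySem.Dict String (List (List (String × String)))) (row : List (String × String)) :
    PySem.Dict String (List (List (String × String))) :=
  if ((PySem.Dict.mk row).contains "ISO_A2") = false then iso  -- Python raises ValueError here; excluded by Pre_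
  else
    let isocode := (PySem.Dict.mk row).getD "ISO_A2" ""
    let iso := iso.insert isocode [row]
    match new2dead.get? isocode with
    | none => iso
    | some deadcodes =>
        deadcodes.foldl (fun iso deadcode =>
          let iso := if iso.contains deadcode = false then iso.insert deadcode [] else iso
          iso.modify deadcode [] (fun l => l ++ [row])) iso

def data2isodict (data : List (List (String × String))) : List (String × List (List (String × String))) :=
  (data.foldl (stepA (deadCountries.foldl (fun n2d p =>
      p.2.foldl (fun n2d new =>
        let n2d := if n2d.contains new = false then n2d.insert new [] else n2d
        n2d.modify new [] (fun l => l ++ [p.1])) n2d) PySem.Dict.empty)) PySem.Dict.empty).items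

-- ===== PORT B =====
-- B's target-key list for a row: the isocode itself, then the dead codes whose
-- successor list contains it (Python list comprehension over _dead_countries.items())
def targetKeys (isocode : String) : List String :=
  isocode :: deadCountries.filterMap (fun p => if p.2.contains isocode then some p.1 else none)

def data2isodict_alt (data : List (List (String × String))) : List (String × List (List (String × String))) :=
  (data.foldl (fun iso row =>
    if ((PySem.Dict.mk row).contains "ISO_A2") = false then iso  -- Python raises ValueError here; excluded by Pre_
    else
      let isocode := (PySem.Dict.mk row).getD "ISO_A2" ""
      (targetKeys isocode).foldl (fun iso key =>
        if key == isocode then iso.insert key [row]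
        else iso.insert key (iso.getD key [] ++ [row])) iso) PySem.Dict.empty).items

-- ===== PRECONDITION & SPEC =====
-- Pre_ excludes exactly the inputs where Python A raises ValueError: a row without an 'ISO_A2' key.
def Pre_data2isodict (data : List (List (String × String))) : Prop :=
  ∀ row ∈ data, "ISO_A2" ∈ row.map Prod.fst
instance (data : List (List (String × String))) : Decidable (Pre_data2isodict data) := by unfold Pre_data2isodict; infer_instance
def pvWitness_data2isodict : (List (List (String × String))) := [[("ISO_A2", "ME"), ("NAME", "Montenegro")]]

def Spec_data2isodict (data : List (List (String × String))) (out : List (String × List (List (String × String)))) : Prop := out = data2isodict_alt data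
instance (data : List (List (String × String))) (out : List (String × List (List (String × String)))) : Decidable (Spec_data2isodict data out) := by unfold Spec_data2isodict; infer_instance

-- ===== CLAIM (what is proved, stated in full; the proofs are below) =====
def Claim_equal_data2isodict : Prop := ∀ (data : List (List (String × String))), Dom_data2isodict data → Pre_data2isodict data → Spec_data2isodict data (data2isodict data)

-- ===== LEMMAS AND PROOFS =====

-- the value A's new2dead-building loop computes (its concrete inverted index)
def new2deadLit : PySem.Dict String (List String) :=
  PySem.Dict.mk [("ME", ["CS", "YU"]), ("RS", ["CS", "YU"]), ("BA", ["YU"]),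
                 ("HR", ["YU"]), ("MK", ["YU"]), ("SI", ["YU"])]

theorem new2dead_eq :
    deadCountries.foldl (fun n2d p =>
      p.2.foldl (fun n2d new =>
        let n2d := if n2d.contains new = false then n2d.insert new [] else n2d
        n2d.modify new [] (fun l => l ++ [p.1])) n2d) PySem.Dict.empty = new2deadLit := by
  decide

-- A's 'create-if-absent then append' equals B's single get-with-default insert
theorem ensure_append_eq_insert_getD (d : PySem.Dict String (List (List (String × String))))
    (k : String) (row : List (String × String)) :
    ((if d.contains k = false then d.insert k [] else d).modify k [] (fun l => l ++ [row])) =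
      d.insert k (d.getD k [] ++ [row]) := by
  have hm : ∀ (e : PySem.Dict String (List (List (String × String)))),
      e.modify k [] (fun l => l ++ [row]) = e.insert k (e.getD k [] ++ [row]) := fun e => rfl
  cases hc : d.contains k
  · simp [hm, PySem.Dict.getD_insert_self, PySem.Dict.insert_insert_self,
      PySem.Dict.getD_of_not_contains d [] hc]
  · simp [hm]

-- the two per-row loop bodies agree
theorem stepA_eq_stepB (iso : PySem.Dict String (List (List (String × String))))
    (row : List (String × String)) :
    stepA new2deadLit iso row =
      (if ((PySem.Dict.mk row).contains "ISO_A2") = false then iso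
       else
        let isocode := (PySem.Dict.mk row).getD "ISO_A2" ""
        (targetKeys isocode).foldl (fun iso key =>
          if key == isocode then iso.insert key [row]
          else iso.insert key (iso.getD key [] ++ [row])) iso) := by
  unfold stepA
  by_cases hk : ((PySem.Dict.mk row).contains "ISO_A2") = false
  · simp [hk]
  · rw [if_neg hk, if_neg hk]
    generalize (PySem.Dict.mk row).getD "ISO_A2" "" = c
    by_cases h1 : c = "ME"
    · subst h1; simp [new2deadLit, targetKeys, deadCountries, PySem.Dict.get?_mk_cons,
        ensure_append_eq_insert_getD]
    by_cases h2 : c = "RS"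
    · subst h2; simp [new2deadLit, targetKeys, deadCountries, PySem.Dict.get?_mk_cons,
        ensure_append_eq_insert_getD]
    by_cases h3 : c = "BA"
    · subst h3; simp [new2deadLit, targetKeys, deadCountries, PySem.Dict.get?_mk_cons,
        ensure_append_eq_insert_getD]
    by_cases h4 : c = "HR"
    · subst h4; simp [new2deadLit, targetKeys, deadCountries, PySem.Dict.get?_mk_cons,
        ensure_append_eq_insert_getD]
    by_cases h5 : c = "MK"
    · subst h5; simp [new2deadLit, targetKeys, deadCountries, PySem.Dict.get?_mk_cons,
        ensure_append_eq_insert_getD]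
    by_cases h6 : c = "SI"
    · subst h6; simp [new2deadLit, targetKeys, deadCountries, PySem.Dict.get?_mk_cons,
        ensure_append_eq_insert_getD]
    simp [new2deadLit, targetKeys, deadCountries, PySem.Dict.get?, h1, h2, h3, h4, h5, h6,
      Ne.symm h1, Ne.symm h2, Ne.symm h3, Ne.symm h4, Ne.symm h5, Ne.symm h6]

-- ===== VERDICT (by name: the statement is the Claim_ definition above) =====
theorem data2isodict_spec : Claim_equal_data2isodict := by
  intro data _ _
  show _ = _
  unfold data2isodict data2isodict_alt
  rw [new2dead_eq, funext fun iso => funext fun row => stepA_eq_stepB iso row]
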